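-- pv_equiv track=rewrite | github.com/rishabhmonga/practice | leet/Facebook/MinimalRuntimeScheduler.py | get_execution_time
-- ===== SOURCE A (Python) =====
-- def get_execution_time(tasks, k):
--     if not tasks:
--         return 0
--     count = 1
--     for idx in range(1, len(tasks)):
--         count += 1
--         if tasks[idx] == tasks[idx - 1]:
--             count += k
--     return count
-- ===== SOURCE B (Python) =====
-- def get_execution_time(tasks, k):
--     # Run-length encode the task list, then charge each run of length m
--     # a cost of m + k * (m - 1): m executions plus a cooldown between
--     # each of the m - 1 identical adjacent pairs inside the run.
--     runs = []
--     for t in tasks: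
--         if runs and runs[-1][0] == t:
--             runs[-1][1] += 1
--         else:
--             runs.append([t, 1])
--     return sum(m + k * (m - 1) for _, m in runs)
-- ===== Notes on version B (the rewrite author's own statement) =====
-- stated objective: alternative
-- what changed: B first run-length encodes the task list into (value, count) runs and then sums per-run costs m + k*(m-1), instead of A's single running counter that conditionally adds k per element; the empty-list guard disappears.
import Mathlib
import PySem

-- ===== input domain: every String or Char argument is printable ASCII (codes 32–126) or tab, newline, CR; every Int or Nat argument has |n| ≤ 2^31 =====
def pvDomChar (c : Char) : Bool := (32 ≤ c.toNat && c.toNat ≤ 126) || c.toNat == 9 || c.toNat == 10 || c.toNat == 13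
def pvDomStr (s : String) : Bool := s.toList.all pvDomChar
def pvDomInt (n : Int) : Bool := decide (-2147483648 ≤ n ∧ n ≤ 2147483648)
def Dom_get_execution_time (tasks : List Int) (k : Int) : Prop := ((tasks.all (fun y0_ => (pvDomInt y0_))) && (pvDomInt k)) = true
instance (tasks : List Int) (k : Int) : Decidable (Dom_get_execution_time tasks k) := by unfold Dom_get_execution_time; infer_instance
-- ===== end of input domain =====

-- B run-length encodes the tasks into (value, count) runs and sums per-run costs m + k*(m-1), instead of A's single running counter; objective: alternative.

-- ===== PORT A =====
def get_execution_time (tasks : List Int) (k : Int) : Int :=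
  if tasks = [] then 0
  else
    (PySem.List.pyRange 1 (tasks.length : Int) 1).foldl
      (fun count idx =>
        let count := count + 1
        if PySem.List.pyGetD tasks idx 0 = PySem.List.pyGetD tasks (idx - 1) 0 then count + k
        else count) 1

-- ===== PORT B =====
/-- one step of Source B's run-length-encoding loop: increment the last run's count
    if its value matches, otherwise append a fresh run `[t, 1]`. -/
def pvRleStep (runs : List (Int × Int)) (t : Int) : List (Int × Int) :=
  match runs.getLast? with
  | some (v, m) => if v = t then runs.dropLast ++ [(v, m + 1)] else runs ++ [(t, 1)]
  | none => [(t, 1)]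

def get_execution_time_alt (tasks : List Int) (k : Int) : Int :=
  ((tasks.foldl pvRleStep []).map (fun p => p.2 + k * (p.2 - 1))).sum

-- ===== PRECONDITION & SPEC =====
def Spec_get_execution_time (tasks : List Int) (k : Int) (out : Int) : Prop := out = get_execution_time_alt tasks k
instance (tasks : List Int) (k : Int) (out : Int) : Decidable (Spec_get_execution_time tasks k out) := by unfold Spec_get_execution_time; infer_instance

-- ===== CLAIM (what is proved, stated in full; the proofs are below) =====
def Claim_equal_get_execution_time : Prop := ∀ (tasks : List Int) (k : Int), Dom_get_execution_time tasks k → Spec_get_execution_time tasks k (get_execution_time tasks k)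

-- ===== LEMMAS AND PROOFS =====

/-- number of adjacent equal pairs, threaded with the previous element -/
def pvPairs (prev : Int) : List Int → Int
  | [] => 0
  | b :: t => (if b = prev then 1 else 0) + pvPairs b t

lemma pvLoop_aux (prev : Int) (rest : List Int) (k acc : Int) :
    (List.range rest.length).foldl
      (fun c j =>
        if (prev :: rest).getD (1 + j) 0 = (prev :: rest).getD j 0 then c + 1 + k else c + 1) acc
    = acc + rest.length + k * pvPairs prev rest := by
  induction rest generalizing prev acc with
  | nil => simp [pvPairs]
  | cons b t ih =>
    rw [List.length_cons, List.range_succ_eq_map, List.foldl_cons, List.foldl_map]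
    have h1 : ∀ (c : Int),
        (List.range t.length).foldl
          (fun c j =>
            if (prev :: b :: t).getD (1 + Nat.succ j) 0 = (prev :: b :: t).getD (Nat.succ j) 0
            then c + 1 + k else c + 1) c
        = (List.range t.length).foldl
          (fun c j =>
            if (b :: t).getD (1 + j) 0 = (b :: t).getD j 0 then c + 1 + k else c + 1) c := by
      intro c
      apply PySem.List.foldl_congr_mem
      intro acc' x _
      have e : 1 + Nat.succ x = (1 + x) + 1 := by omega
      simp [Nat.succ_eq_add_one, e]
    rw [h1, ih b]
    simp [pvPairs]
    split_ifs <;> ring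

/-- invariant of the RLE loop: folding the remaining elements over an
    accumulator whose last run is `(prev, m)` adds one per element plus `k`
    per adjacent equal pair. -/
lemma pvRle_aux (k : Int) (rest : List Int) :
    ∀ (rs : List (Int × Int)) (prev m : Int),
    ((List.foldl pvRleStep (rs ++ [(prev, m)]) rest).map (fun p => p.2 + k * (p.2 - 1))).sum
      = ((rs ++ [(prev, m)]).map (fun p => p.2 + k * (p.2 - 1))).sum
        + rest.length + k * pvPairs prev rest := by
  induction rest with
  | nil => intro rs prev m; simp [pvPairs]
  | cons b t ih =>
    intro rs prev m
    rw [List.foldl_cons]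
    have hstep : pvRleStep (rs ++ [(prev, m)]) b
        = if prev = b then rs ++ [(prev, m + 1)] else (rs ++ [(prev, m)]) ++ [(b, 1)] := by
      simp [pvRleStep]
    by_cases hb : prev = b
    · rw [hstep, if_pos hb, ih rs prev (m + 1)]
      subst hb
      simp [pvPairs]
      ring
    · rw [hstep, if_neg hb, ih (rs ++ [(prev, m)]) b 1]
      have : ¬ b = prev := fun h => hb h.symm
      simp [pvPairs, this]
      ring

theorem pvMain (tasks : List Int) (k : Int) :
    get_execution_time tasks k = get_execution_time_alt tasks k := by
  cases tasks with
  | nil => simp [get_execution_time, get_execution_time_alt]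
  | cons a rest =>
    unfold get_execution_time get_execution_time_alt
    rw [if_neg (by simp)]
    -- B side: the first element opens the first run
    have hB : List.foldl pvRleStep [] (a :: rest)
        = List.foldl pvRleStep ([] ++ [(a, 1)]) rest := by
      simp [pvRleStep]
    rw [hB, pvRle_aux k rest [] a 1]
    -- A side: reduce the pyRange foldl to the getD form and apply pvLoop_aux
    rw [PySem.List.pyRange_one]
    have hlen : (((a :: rest).length : Int) - 1).toNat = rest.length := by simp
    rw [hlen, List.foldl_map]
    have hbody := PySem.List.foldl_congr_mem (List.range rest.length)
      (fun x y => if PySem.List.pyGetD (a :: rest) (1 + (y : Int)) 0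
                     = PySem.List.pyGetD (a :: rest) (1 + (y : Int) - 1) 0
                  then x + 1 + k else x + 1)
      (fun c j => if (a :: rest).getD (1 + j) 0 = (a :: rest).getD j 0 then c + 1 + k else c + 1)
      1
      (by
        intro acc x _
        have e2 : (1 : Int) + (x : Int) - 1 = ((x : Nat) : Int) := by ring
        have e1 : (1 : Int) + (x : Int) = ((1 + x : Nat) : Int) := by push_cast; ring
        simp only [e2]
        simp only [e1, PySem.List.pyGetD_natCast])
    rw [hbody, pvLoop_aux]
    simp

-- ===== VERDICT (by name: the statement is the Claim_ definition above) =====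
theorem get_execution_time_spec : Claim_equal_get_execution_time := by
  intro tasks k _
  exact pvMain tasks k
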